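-- pv_equiv track=rewrite | github.com/jplopezinnohunt/abapobjectscreation | Zagentexecution/mcp-backend-server-python/reextract_unesco_dmee_for_alignment.py | normalize_for_diff
-- ===== SOURCE A (Python) =====
-- def normalize_for_diff(text):
--     """Strip leading/trailing whitespace per line, collapse blank-line runs."""
--     lines = []
--     prev_blank = False
--     for ln in text.splitlines():
--         s = ln.rstrip()
--         is_blank = not s.strip()
--         if is_blank and prev_blank:
--             continue
--         lines.append(s)
--         prev_blank = is_blank
--     return '\n'.join(lines)
-- ===== SOURCE B (Python) =====
-- def normalize_for_diff(text):
--     """Strip trailing whitespace per line, collapse blank-line runs."""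
--     lines = [ln.rstrip() for ln in text.splitlines()]
--     out = []
--     i, n = 0, len(lines)
--     while i < n:
--         if lines[i]:
--             out.append(lines[i])
--             i += 1
--         else:
--             out.append('')
--             while i < n and not lines[i]:
--                 i += 1
--     return '\n'.join(out)
-- ===== Notes on version B (the rewrite author's own statement) =====
-- stated objective: alternative
-- what changed: Replaces A's per-line prev_blank state machine with a two-phase run-collapser: first rstrip all lines, then an index loop that emits non-blank lines one by one and, on hitting a blank, emits a single empty line and skips the whole blank run with an inner scan (no carried flag).
import Mathlib
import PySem

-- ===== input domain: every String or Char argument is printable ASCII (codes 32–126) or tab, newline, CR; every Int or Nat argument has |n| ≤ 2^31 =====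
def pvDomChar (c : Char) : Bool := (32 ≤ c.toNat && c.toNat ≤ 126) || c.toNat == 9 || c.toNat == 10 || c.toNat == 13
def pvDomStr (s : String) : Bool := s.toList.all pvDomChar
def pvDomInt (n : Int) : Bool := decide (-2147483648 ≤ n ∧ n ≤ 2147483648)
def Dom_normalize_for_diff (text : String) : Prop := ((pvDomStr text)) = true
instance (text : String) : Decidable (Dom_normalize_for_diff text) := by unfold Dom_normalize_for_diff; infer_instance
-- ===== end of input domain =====

-- B rstrips every line up front and collapses blank runs with an inner skip-scan instead of A's
-- carried prev_blank flag; same cost, a different decomposition (objective: alternative).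

-- ===== PORT A =====
def normalize_for_diff (text : String) : String :=
  let r := (PySem.Str.splitlines text).foldl
    (fun (st : List String × Bool) ln =>
      let s := PySem.Str.rstrip ln
      let is_blank := (PySem.Str.strip s).toList.isEmpty   -- truthiness of s.strip(): empty string
      if is_blank && st.2 then st
      else (st.1 ++ [s], is_blank))
    ([], false)
  PySem.Str.join "\n" r.1

-- ===== PORT B =====
-- the while-loop of Source B: emit a non-blank line, or emit "" and skip the whole blank run
def nfdCollapse : List String → List String
  | [] => []
  | l :: rest =>
    if l.toList.isEmpty then
      "" :: nfdCollapse (rest.dropWhile (fun x => x.toList.isEmpty))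
    else
      l :: nfdCollapse rest
termination_by ls => ls.length
decreasing_by
  · exact Nat.lt_succ_of_le (List.length_dropWhile_le _ _)
  · simp

def normalize_for_diff_alt (text : String) : String :=
  PySem.Str.join "\n" (nfdCollapse ((PySem.Str.splitlines text).map PySem.Str.rstrip))

-- ===== PRECONDITION & SPEC =====
def Spec_normalize_for_diff (text : String) (out : String) : Prop := out = normalize_for_diff_alt text
instance (text : String) (out : String) : Decidable (Spec_normalize_for_diff text out) := by unfold Spec_normalize_for_diff; infer_instance

-- ===== CLAIM (what is proved, stated in full; the proofs are below) =====
def Claim_equal_normalize_for_diff : Prop := ∀ (text : String), Dom_normalize_for_diff text → Spec_normalize_for_diff text (normalize_for_diff text)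

-- ===== LEMMAS AND PROOFS =====

-- A's loop body, named for the proofs (definitionally A's inline lambda)
def nfdStep : List String × Bool → String → List String × Bool := fun st ln =>
  let s := PySem.Str.rstrip ln
  let is_blank := (PySem.Str.strip s).toList.isEmpty
  if is_blank && st.2 then st
  else (st.1 ++ [s], is_blank)

-- rstrip is idempotent (dropWhile is)
theorem nfd_rstrip_idem (cs : List Char) :
    PySem.Chars.rstrip (PySem.Chars.rstrip cs) = PySem.Chars.rstrip cs := by
  simp [PySem.Chars.rstrip, List.dropWhile_idempotent]

-- after rstrip, "line.strip() is empty" is the same test as "line is empty"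
theorem nfd_blank_eq (ln : String) :
    (PySem.Str.strip (PySem.Str.rstrip ln)).toList.isEmpty
      = (PySem.Str.rstrip ln).toList.isEmpty := by
  simp only [PySem.Str.toList_strip, PySem.Str.toList_rstrip]
  by_cases h : PySem.Chars.rstrip ln.toList = []
  · rw [h]; rfl
  · rw [Bool.eq_iff_iff]
    simp only [List.isEmpty_iff, h, iff_false]
    intro hstrip
    apply h
    -- strip (rstrip cs) = [] → every char of rstrip cs is whitespace → rstrip (rstrip cs) = []
    have hall : ∀ c ∈ PySem.Chars.rstrip ln.toList, PySem.Chars.isspace c = true := by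
      intro c hc
      rcases (List.takeWhile_append_dropWhile (p := PySem.Chars.isspace)
          (l := PySem.Chars.rstrip ln.toList)).symm ▸ hc |> List.mem_append.mp with h1 | h2
      · exact List.mem_takeWhile_imp h1
      · -- c lies in the lstrip part, which rstrips to [] hence is all whitespace
        have h3 : PySem.Chars.rstrip (PySem.Chars.lstrip (PySem.Chars.rstrip ln.toList)) = [] :=
          hstrip
        simp only [PySem.Chars.rstrip, List.reverse_eq_nil_iff, List.dropWhile_eq_nil_iff,
          List.mem_reverse] at h3
        exact h3 c h2
    have h4 : PySem.Chars.rstrip (PySem.Chars.rstrip ln.toList) = [] := by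
      simp only [PySem.Chars.rstrip, List.reverse_eq_nil_iff, List.dropWhile_eq_nil_iff,
        List.mem_reverse]
      intro c hc
      exact hall c (by simpa [PySem.Chars.rstrip] using hc)
    rwa [nfd_rstrip_idem] at h4

-- unfolding lemma for the (well-founded) run-collapser on a cons
theorem nfdCollapse_cons (l : String) (rest : List String) :
    nfdCollapse (l :: rest)
      = if l.toList.isEmpty then
          "" :: nfdCollapse (rest.dropWhile (fun x => x.toList.isEmpty))
        else l :: nfdCollapse rest := by
  rw [nfdCollapse.eq_def]

-- the main loop invariant: A's fold from (acc, prev) appends exactly B's collapse of the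
-- rstripped remaining lines (with the leading blank run already swallowed when prev = true)
theorem nfd_fold (ls : List String) (acc : List String) (prev : Bool) :
    (ls.foldl nfdStep (acc, prev)).1
    = acc ++ nfdCollapse
        (if prev then (ls.map PySem.Str.rstrip).dropWhile (fun x => x.toList.isEmpty)
         else ls.map PySem.Str.rstrip) := by
  induction ls generalizing acc prev with
  | nil => cases prev <;> simp [nfdCollapse]
  | cons ln rest ih =>
    rw [List.foldl_cons]
    by_cases hb : (PySem.Str.rstrip ln).toList.isEmpty = true
    · have hbl : (PySem.Str.strip (PySem.Str.rstrip ln)).toList.isEmpty = true := by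
        rw [nfd_blank_eq]; exact hb
      have he : PySem.Str.rstrip ln = "" := String.toList_eq_nil_iff.mp (by simpa using hb)
      cases prev with
      | true =>
        have hstep : nfdStep (acc, true) ln = (acc, true) := by
          simp only [nfdStep]; rw [hbl]; simp
        rw [hstep, ih acc true, if_pos rfl, if_pos rfl, List.map_cons, he,
          List.dropWhile_cons]
        simp
      | false =>
        have hstep : nfdStep (acc, false) ln = (acc ++ [PySem.Str.rstrip ln], true) := by
          simp only [nfdStep]; rw [hbl]; simp
        rw [hstep, ih (acc ++ [PySem.Str.rstrip ln]) true, if_pos rfl, if_neg (by simp),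
          List.map_cons, he, nfdCollapse_cons]
        simp
    · have hb' : (PySem.Str.rstrip ln).toList.isEmpty = false := by simpa using hb
      have hbl : (PySem.Str.strip (PySem.Str.rstrip ln)).toList.isEmpty = false := by
        rw [nfd_blank_eq]; exact hb'
      have hstep : nfdStep (acc, prev) ln = (acc ++ [PySem.Str.rstrip ln], false) := by
        simp only [nfdStep]; rw [hbl]; simp
      rw [hstep, ih (acc ++ [PySem.Str.rstrip ln]) false, if_neg (by simp)]
      cases prev with
      | true =>
        rw [if_pos rfl, List.map_cons, List.dropWhile_cons, if_neg (by simpa using hb),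
          nfdCollapse_cons, if_neg (by simpa using hb)]
        simp
      | false =>
        rw [if_neg (by simp), List.map_cons, nfdCollapse_cons, if_neg (by simpa using hb)]
        simp

-- ===== VERDICT (by name: the statement is the Claim_ definition above) =====
theorem normalize_for_diff_spec : Claim_equal_normalize_for_diff := by
  intro text _
  show PySem.Str.join "\n"
      (((PySem.Str.splitlines text).foldl nfdStep ([], false)).1) = _
  rw [nfd_fold (PySem.Str.splitlines text) [] false]
  simp [normalize_for_diff_alt]
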